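-- pv_equiv track=rewrite | github.com/pypi-data/pypi-mirror-141 | packages/orbis-eval/orbis_eval-2.3.5-py3-none-any.whl/orbis_eval/libs/filter.py | _entity_contains_annotations
-- ===== SOURCE A (Python) =====
-- def _entity_contains_annotations(entity, annotations):
--     for annotation in annotations:
--         for annotation_filter in annotations[annotation]:
--             if 'annotations' in entity:
--                 for annotation_entity in entity['annotations']:
--                     if _contains_annotation(annotation_entity, annotation, annotation_filter):
--                         return True
--     return False
--
-- def _contains_annotation(annotation_entity, annotation, annotation_filter):
--     return 'type' in annotation_entity and 'entity' in annotation_entity and \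
--            annotation_entity['type'] == annotation and \
--            annotation_entity['entity'] == annotation_filter
-- ===== SOURCE B (Python) =====
-- def _entity_contains_annotations(entity, annotations):
--     # Single pass over the entity's own annotations, using the passed-in
--     # annotations dict as a type -> filters lookup table.
--     if 'annotations' not in entity:
--         return False
--     for annotation_entity in entity['annotations']:
--         if 'type' in annotation_entity and 'entity' in annotation_entity:
--             filters = annotations.get(annotation_entity['type'])
--             if filters is not None and annotation_entity['entity'] in filters:
--                 return True
--     return False
-- ===== Notes on version B (the rewrite author's own statement) =====
-- stated objective: alternative
-- what changed: Inverts the traversal: instead of nesting loops over every (type, filter) pair and rescanning the entity's annotation list for each, B makes one pass over entity['annotations'] and uses the passed-in annotations dict as a direct type->filters lookup, testing membership in the looked-up filter list.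
import Mathlib
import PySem

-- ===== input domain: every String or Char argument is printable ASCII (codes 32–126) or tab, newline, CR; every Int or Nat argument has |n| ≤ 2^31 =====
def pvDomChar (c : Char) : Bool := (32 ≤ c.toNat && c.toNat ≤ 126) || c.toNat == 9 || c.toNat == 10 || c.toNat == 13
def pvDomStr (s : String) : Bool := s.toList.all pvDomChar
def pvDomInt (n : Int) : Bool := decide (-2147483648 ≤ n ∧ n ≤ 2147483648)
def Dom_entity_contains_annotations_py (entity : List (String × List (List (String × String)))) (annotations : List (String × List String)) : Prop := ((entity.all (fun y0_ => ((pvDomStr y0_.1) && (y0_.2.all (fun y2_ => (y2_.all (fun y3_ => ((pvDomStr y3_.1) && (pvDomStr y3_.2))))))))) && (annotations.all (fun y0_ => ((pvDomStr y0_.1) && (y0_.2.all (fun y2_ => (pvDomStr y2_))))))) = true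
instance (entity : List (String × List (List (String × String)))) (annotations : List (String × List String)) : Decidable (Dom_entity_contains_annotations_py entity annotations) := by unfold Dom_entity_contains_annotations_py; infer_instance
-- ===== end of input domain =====

-- ===== PORT A =====
-- B inverts A's traversal (one pass over the entity's annotations with a type->filters
-- lookup) instead of nested loops over every (type, filter) pair; return values proved equal.
-- dict lookup / 'k in d' on the association lists = first match, via List.lookup
def pvContainsAnnotation (annotation_entity : List (String × String)) (annotation : String) (annotation_filter : String) : Bool :=
  match annotation_entity.lookup "type", annotation_entity.lookup "entity" with
  | some ty, some en => ty == annotation && en == annotation_filter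
  | _, _ => false

def entity_contains_annotations_py (entity : List (String × List (List (String × String)))) (annotations : List (String × List String)) : Bool :=
  annotations.any (fun kv =>
    ((annotations.lookup kv.1).getD []).any (fun annotation_filter =>
      if (entity.lookup "annotations").isSome then
        ((entity.lookup "annotations").getD []).any (fun annotation_entity =>
          pvContainsAnnotation annotation_entity kv.1 annotation_filter)
      else false))

-- ===== PORT B =====
def entity_contains_annotations_py_alt (entity : List (String × List (List (String × String)))) (annotations : List (String × List String)) : Bool :=
  match entity.lookup "annotations" with
  | none => false
  | some anns =>
    anns.any (fun annotation_entity =>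
      match annotation_entity.lookup "type", annotation_entity.lookup "entity" with
      | some ty, some en =>
        match annotations.lookup ty with
        | some filters => filters.contains en
        | none => false
      | _, _ => false)

-- ===== PRECONDITION & SPEC =====
def Spec_entity_contains_annotations_py (entity : List (String × List (List (String × String)))) (annotations : List (String × List String)) (out : Bool) : Prop := out = entity_contains_annotations_py_alt entity annotations
instance (entity : List (String × List (List (String × String)))) (annotations : List (String × List String)) (out : Bool) : Decidable (Spec_entity_contains_annotations_py entity annotations out) := by unfold Spec_entity_contains_annotations_py; infer_instance

-- ===== CLAIM (what is proved, stated in full; the proofs are below) =====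
def Claim_equal_entity_contains_annotations_py : Prop := ∀ (entity : List (String × List (List (String × String)))) (annotations : List (String × List String)), Dom_entity_contains_annotations_py entity annotations → Spec_entity_contains_annotations_py entity annotations (entity_contains_annotations_py entity annotations)

-- ===== LEMMAS AND PROOFS =====
theorem pv_mem_of_lookup_eq_some {α β : Type} [BEq α] [LawfulBEq α] {l : List (α × β)} {k : α} {v : β} (h : l.lookup k = some v) : (k, v) ∈ l := by
  induction l with
  | nil => simp [List.lookup] at h
  | cons p rest ih =>
    obtain ⟨a, b⟩ := p
    rw [List.lookup] at h
    by_cases hk : k == a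
    · simp only [hk] at h
      simp at hk
      subst hk
      cases h
      exact List.mem_cons_self
    · simp only [hk] at h
      exact List.mem_cons_of_mem _ (ih h)

theorem entity_contains_annotations_py_spec : Claim_equal_entity_contains_annotations_py := by
  intro entity annotations _
  unfold Spec_entity_contains_annotations_py
  unfold entity_contains_annotations_py entity_contains_annotations_py_alt
  cases hE : entity.lookup "annotations" with
  | none => simp
  | some anns =>
    simp only [Option.isSome_some, if_true, Option.getD_some]
    rw [Bool.eq_iff_iff]
    simp only [List.any_eq_true]
    constructor
    · rintro ⟨kv, hkv, f, hf, ae, hae, hc⟩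
      refine ⟨ae, hae, ?_⟩
      unfold pvContainsAnnotation at hc
      cases hty : ae.lookup "type" with
      | none => simp [hty] at hc
      | some ty =>
        cases hen : ae.lookup "entity" with
        | none => simp [hty, hen] at hc
        | some en =>
          simp only [hty, hen] at hc ⊢
          simp only [Bool.and_eq_true, beq_iff_eq] at hc
          obtain ⟨h1, h2⟩ := hc
          subst h1; subst h2
          cases hA : annotations.lookup kv.1 with
          | none => simp [hA] at hf
          | some fs =>
            simp [hA] at hf ⊢
            exact hf
    · rintro ⟨ae, hae, hc⟩
      cases hty : ae.lookup "type" with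
      | none => simp [hty] at hc
      | some ty =>
        cases hen : ae.lookup "entity" with
        | none => simp [hty, hen] at hc
        | some en =>
          simp only [hty, hen] at hc
          cases hA : annotations.lookup ty with
          | none => simp [hA] at hc
          | some fs =>
            simp only [hA, List.contains_eq_mem, decide_eq_true_eq] at hc
            refine ⟨(ty, fs), pv_mem_of_lookup_eq_some hA, en, ?_, ae, hae, ?_⟩
            · simp only [hA, Option.getD_some]; exact hc
            · unfold pvContainsAnnotation
              simp [hty, hen]
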